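-- pv_equiv track=rewrite | github.com/ailton-santos/Python_DataScience | 02_AULA 2/Math/38 - MATH_MODA_V1.py | EncontrarModa
-- ===== SOURCE A (Python) =====
-- def EncontrarModa(lista1,lista2):
--
--     initialValue = lista2[0]
--     indiceModa = 0
--     cont = 0
--
--     for o in lista2:
--
--         if(initialValue <= o):
--             initialValue = o
--             indiceModa = cont
--
--         cont += 1
--
--
--     return lista1[indiceModa]
-- ===== SOURCE B (Python) =====
-- def EncontrarModa(lista1, lista2):
--     # Divide and conquer: index of the LAST maximum of lista2[lo:hi]
--     def best(lo, hi):
--         if hi - lo <= 1: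
--             return lo
--         mid = (lo + hi) // 2
--         i = best(lo, mid)
--         j = best(mid, hi)
--         return j if lista2[i] <= lista2[j] else i
--     return lista1[best(0, len(lista2))]
-- ===== Notes on version B (the rewrite author's own statement) =====
-- stated objective: alternative
-- what changed: replaces A's single left-to-right running-max scan carrying (value, index, counter) state with a recursive divide-and-conquer argmax that splits the index range at the midpoint and combines halves with <= so ties resolve to the last maximum, matching A.
import Mathlib
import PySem

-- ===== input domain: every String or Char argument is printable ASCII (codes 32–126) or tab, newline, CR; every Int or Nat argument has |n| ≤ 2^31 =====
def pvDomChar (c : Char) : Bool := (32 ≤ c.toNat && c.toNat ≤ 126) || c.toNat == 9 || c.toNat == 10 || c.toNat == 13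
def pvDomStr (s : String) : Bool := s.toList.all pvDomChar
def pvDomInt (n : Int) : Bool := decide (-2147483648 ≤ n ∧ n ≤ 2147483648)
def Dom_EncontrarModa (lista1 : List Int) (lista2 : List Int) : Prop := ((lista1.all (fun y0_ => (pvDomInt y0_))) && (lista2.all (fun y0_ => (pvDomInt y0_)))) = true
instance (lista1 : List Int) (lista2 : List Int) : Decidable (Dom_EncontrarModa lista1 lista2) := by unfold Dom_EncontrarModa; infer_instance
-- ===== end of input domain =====

-- B replaces A's single running-max scan carrying (value, index, counter) state with a
-- recursive divide-and-conquer argmax over the index range, combining halves with <=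
-- so ties resolve to the LAST maximum, as A's `<=` update does (alternative structure).

-- ===== PORT A =====
def EncontrarModa (lista1 : List Int) (lista2 : List Int) : Int :=
  match PySem.List.pyGet? lista2 0 with
  | none => 0  -- lista2[0] raises IndexError on empty lista2; excluded by Pre_
  | some initialValue0 =>
    -- for o in lista2: if initialValue <= o: initialValue = o; indiceModa = cont; cont += 1
    let st := lista2.foldl
      (fun (s : Int × Int × Int) o =>
        if s.1 ≤ o then (o, s.2.2, s.2.2 + 1) else (s.1, s.2.1, s.2.2 + 1))
      (initialValue0, 0, 0)
    match PySem.List.pyGet? lista1 st.2.1 with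
    | none => 0  -- lista1[indiceModa] raises IndexError; excluded by Pre_
    | some r => r

-- ===== PORT B =====
-- midpoint of a range of length ≥ 2 lies strictly inside it (used for termination)
theorem pvMidBounds (lo hi : Int) (h : lo + 2 ≤ hi) :
    lo + 1 ≤ PySem.Int.floordiv (lo + hi) 2 ∧ PySem.Int.floordiv (lo + hi) 2 < hi :=
  ⟨(PySem.Int.le_floordiv_iff_mul_le (by norm_num)).2 (by omega),
   (PySem.Int.floordiv_lt_iff_lt_mul (by norm_num)).2 (by omega)⟩

-- def best(lo, hi): index of the LAST maximum of lista2[lo:hi]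
-- (lista2[i] / lista2[j] always have lo ≤ index < hi ≤ len(lista2) at the call sites,
--  so the index is in range and pyGetD is exact for Python's lista2[...])
def pvBest (lista2 : List Int) (lo hi : Int) : Int :=
  if _hle : hi - lo ≤ 1 then lo
  else
    let mid := PySem.Int.floordiv (lo + hi) 2
    let i := pvBest lista2 lo mid
    let j := pvBest lista2 mid hi
    if PySem.List.pyGetD lista2 i 0 ≤ PySem.List.pyGetD lista2 j 0 then j else i
termination_by (hi - lo).toNat
decreasing_by
  · have := pvMidBounds lo hi (by omega)
    omega
  · have := pvMidBounds lo hi (by omega)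
    omega

def EncontrarModa_alt (lista1 : List Int) (lista2 : List Int) : Int :=
  match PySem.List.pyGet? lista1 (pvBest lista2 0 (lista2.length : Int)) with
  | none => 0  -- lista1[best(0, len(lista2))] raises IndexError; excluded by Pre_
  | some r => r

-- ===== PRECONDITION & SPEC =====
-- Pre_ is exactly where the Python A returns: lista2 is nonempty and the index i of the
-- LAST maximum of lista2 (its value dominates every entry and strictly dominates every
-- later entry) is a valid index into lista1; on every other input A raises IndexError.
def Pre_EncontrarModa (lista1 : List Int) (lista2 : List Int) : Prop :=
  lista2 ≠ [] ∧ ∃ i < lista2.length, i < lista1.length ∧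
    (∀ j < lista2.length, lista2.getD j 0 ≤ lista2.getD i 0) ∧
    (∀ j < lista2.length, i < j → lista2.getD j 0 < lista2.getD i 0)
instance (lista1 : List Int) (lista2 : List Int) : Decidable (Pre_EncontrarModa lista1 lista2) := by unfold Pre_EncontrarModa; infer_instance

def pvWitness_EncontrarModa : List Int × List Int := ([5, 7, 1], [3, 9, 9])

def Spec_EncontrarModa (lista1 : List Int) (lista2 : List Int) (out : Int) : Prop := out = EncontrarModa_alt lista1 lista2
instance (lista1 : List Int) (lista2 : List Int) (out : Int) : Decidable (Spec_EncontrarModa lista1 lista2 out) := by unfold Spec_EncontrarModa; infer_instance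

-- ===== CLAIM (what is proved, stated in full; the proofs are below) =====
def Claim_equal_EncontrarModa : Prop := ∀ (lista1 : List Int) (lista2 : List Int), Dom_EncontrarModa lista1 lista2 → Pre_EncontrarModa lista1 lista2 → Spec_EncontrarModa lista1 lista2 (EncontrarModa lista1 lista2)

-- ===== LEMMAS AND PROOFS =====

-- the maximum value of a nonempty list, and the index of its LAST occurrence
def pvMax : List Int → Int
  | [] => 0
  | h :: t => t.foldl max h

def pvRevIdx (l : List Int) : Nat := (PySem.List.index? l.reverse (pvMax l)).getD 0
def pvLastIdx (l : List Int) : Nat := l.length - 1 - pvRevIdx l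

theorem pvMax_mem (l : List Int) (h : l ≠ []) : pvMax l ∈ l := by
  cases l with
  | nil => simp at h
  | cons a t =>
    rcases PySem.List.foldl_max_mem t a with h1 | h1 <;> simp [pvMax, h1]

theorem pvMax_isMax (l : List Int) : ∀ y ∈ l, y ≤ pvMax l := by
  cases l with
  | nil => simp
  | cons a t =>
    intro y hy
    rcases List.mem_cons.1 hy with rfl | hy
    · exact (PySem.List.le_foldl_max t y).1
    · exact (PySem.List.le_foldl_max t a).2 y hy

theorem pvRevIdx_lt (l : List Int) (h : l ≠ []) : pvRevIdx l < l.length := by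
  have hm : pvMax l ∈ l.reverse := by simpa using pvMax_mem l h
  have hs := (PySem.List.index?_isSome_iff (xs := l.reverse) (v := pvMax l)).2 hm
  rcases Option.isSome_iff_exists.1 hs with ⟨k, hk⟩
  rcases PySem.List.getElem_of_index?_eq_some hk with ⟨hklt, -, -⟩
  unfold pvRevIdx
  rw [hk]
  simpa using hklt

theorem pvMax_snoc (l : List Int) (h : l ≠ []) (x : Int) :
    pvMax (l ++ [x]) = max (pvMax l) x := by
  cases l with
  | nil => simp at h
  | cons a t => simp [pvMax, List.foldl_append]

theorem pvRevIdx_snoc_le (l : List Int) (h : l ≠ []) (x : Int) (hle : pvMax l ≤ x) :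
    pvRevIdx (l ++ [x]) = 0 := by
  unfold pvRevIdx
  rw [pvMax_snoc l h x, max_eq_right hle]
  simp only [List.reverse_append, List.reverse_singleton, List.singleton_append]
  rw [PySem.List.index?_cons_self]
  rfl

theorem pvRevIdx_snoc_lt (l : List Int) (h : l ≠ []) (x : Int) (hlt : x < pvMax l) :
    pvRevIdx (l ++ [x]) = pvRevIdx l + 1 := by
  unfold pvRevIdx
  rw [pvMax_snoc l h x, max_eq_left hlt.le]
  simp only [List.reverse_append, List.reverse_singleton, List.singleton_append]
  rw [PySem.List.index?_cons_of_ne _ (by omega : x ≠ pvMax l)]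
  have hm : pvMax l ∈ l.reverse := by simpa using pvMax_mem l h
  rcases (PySem.List.index?_isSome_iff (xs := l.reverse) (v := pvMax l)).2 hm with hs
  rcases Option.isSome_iff_exists.1 hs with ⟨k, hk⟩
  rw [hk]
  rfl

theorem loopA (l : List Int) (h : l ≠ []) :
    l.foldl (fun (s : Int × Int × Int) o =>
        if s.1 ≤ o then (o, s.2.2, s.2.2 + 1) else (s.1, s.2.1, s.2.2 + 1))
      (l.headD 0, 0, 0)
      = (pvMax l, (pvLastIdx l : Int), (l.length : Int)) := by
  induction l using List.reverseRecOn with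
  | nil => simp at h
  | append_singleton ys x ih =>
    by_cases hys : ys = []
    · subst hys
      simp [pvMax, pvLastIdx, pvRevIdx]
    · have hd : (ys ++ [x]).headD 0 = ys.headD 0 := by
        cases ys with
        | nil => simp at hys
        | cons a t => simp
      rw [List.foldl_append, hd, ih hys]
      simp only [List.foldl_cons, List.foldl_nil]
      have hlen := pvRevIdx_lt ys hys
      have hysl : 0 < ys.length := List.length_pos_iff.2 hys
      by_cases hle : pvMax ys ≤ x
      · rw [if_pos hle]
        have h1 : pvMax (ys ++ [x]) = x := by rw [pvMax_snoc ys hys x, max_eq_right hle]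
        have h2 : pvLastIdx (ys ++ [x]) = ys.length := by
          unfold pvLastIdx
          rw [pvRevIdx_snoc_le ys hys x hle]
          simp
        rw [h1, h2]
        simp
      · rw [if_neg hle]
        push Not at hle
        have h1 : pvMax (ys ++ [x]) = pvMax ys := by
          rw [pvMax_snoc ys hys x, max_eq_left hle.le]
        have h2 : pvLastIdx (ys ++ [x]) = pvLastIdx ys := by
          unfold pvLastIdx
          rw [pvRevIdx_snoc_lt ys hys x hle]
          simp only [List.length_append, List.length_singleton]
          omega
        rw [h1, h2]
        simp

theorem pvLastIdx_lt (l : List Int) (h : l ≠ []) : pvLastIdx l < l.length := by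
  have h1 := pvRevIdx_lt l h
  have h0 : 0 < l.length := List.length_pos_iff.2 h
  unfold pvLastIdx
  omega

theorem index?_rev (l : List Int) (h : l ≠ []) :
    PySem.List.index? l.reverse (pvMax l) = some (pvRevIdx l) := by
  have hm : pvMax l ∈ l.reverse := by simpa using pvMax_mem l h
  have hs := (PySem.List.index?_isSome_iff (xs := l.reverse) (v := pvMax l)).2 hm
  rcases Option.isSome_iff_exists.1 hs with ⟨k, hk⟩
  rw [hk]
  unfold pvRevIdx
  rw [hk]
  rfl

theorem pvLastIdx_get (l : List Int) (h : l ≠ []) :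
    l.getD (pvLastIdx l) 0 = pvMax l := by
  rcases PySem.List.getElem_of_index?_eq_some (index?_rev l h) with ⟨hk, hv, -⟩
  have hlt := pvLastIdx_lt l h
  have : l[pvLastIdx l]'hlt = pvMax l := by
    rw [← hv, List.getElem_reverse]
    simp [pvLastIdx]
  rw [List.getD_eq_getElem l 0 hlt, this]

theorem pvLastIdx_last (l : List Int) (h : l ≠ []) :
    ∀ j, j < l.length → pvLastIdx l < j → l.getD j 0 ≠ pvMax l := by
  intro j hj hgt
  rcases PySem.List.getElem_of_index?_eq_some (index?_rev l h) with ⟨hk, hv, hmin⟩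
  have hk' : pvRevIdx l < l.length := by simpa using hk
  have hij : l.length - 1 - j < pvRevIdx l := by unfold pvLastIdx at hgt; omega
  have := hmin (l.length - 1 - j) (by simpa using hij)
  rw [List.getElem_reverse] at this
  have hj' : l.length - 1 - (l.length - 1 - j) = j := by omega
  rw [List.getD_eq_getElem l 0 hj]
  simpa [hj'] using this

-- "b is the index of the LAST maximum of lista2[lo:hi]" (pyGetD form, Int indices)
def pvIsBest (l2 : List Int) (lo hi b : Int) : Prop :=
  lo ≤ b ∧ b < hi ∧
  (∀ j, lo ≤ j → j < hi → PySem.List.pyGetD l2 j 0 ≤ PySem.List.pyGetD l2 b 0) ∧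
  (∀ j, b < j → j < hi → PySem.List.pyGetD l2 j 0 < PySem.List.pyGetD l2 b 0)

theorem pvIsBest_unique (l2 : List Int) (lo hi b b' : Int)
    (h1 : pvIsBest l2 lo hi b) (h2 : pvIsBest l2 lo hi b') : b = b' := by
  obtain ⟨hb1, hb2, hbmax, hbstrict⟩ := h1
  obtain ⟨hc1, hc2, hcmax, hcstrict⟩ := h2
  by_contra hne
  rcases lt_or_gt_of_ne hne with hlt | hgt
  · have h3 := hbstrict b' hlt hc2
    have h4 := hcmax b hb1 hb2
    omega
  · have h3 := hcstrict b hgt hb2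
    have h4 := hbmax b' hc1 hc2
    omega

theorem pvBest_isBest (l2 : List Int) :
    ∀ n (lo hi : Int), (hi - lo).toNat = n → lo < hi → pvIsBest l2 lo hi (pvBest l2 lo hi) := by
  intro n
  induction n using Nat.strong_induction_on with
  | _ n ih =>
    intro lo hi hn hlt
    rw [pvBest]
    by_cases hle : hi - lo ≤ 1
    · rw [dif_pos hle]
      refine ⟨le_refl lo, hlt, ?_, ?_⟩
      · intro j hj1 hj2
        have : j = lo := by omega
        subst this; exact le_refl _
      · intro j hj1 hj2; omega
    · rw [dif_neg hle]
      have hmid := pvMidBounds lo hi (by omega)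
      set mid := PySem.Int.floordiv (lo + hi) 2 with hmiddef
      have hiL : pvIsBest l2 lo mid (pvBest l2 lo mid) :=
        ih (mid - lo).toNat (by omega) lo mid rfl (by omega)
      have hiR : pvIsBest l2 mid hi (pvBest l2 mid hi) :=
        ih (hi - mid).toNat (by omega) mid hi rfl (by omega)
      obtain ⟨hL1, hL2, hLmax, hLstrict⟩ := hiL
      obtain ⟨hR1, hR2, hRmax, hRstrict⟩ := hiR
      set i := pvBest l2 lo mid
      set j := pvBest l2 mid hi
      by_cases hcmp : PySem.List.pyGetD l2 i 0 ≤ PySem.List.pyGetD l2 j 0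
      · rw [if_pos hcmp]
        refine ⟨by omega, hR2, ?_, ?_⟩
        · intro k hk1 hk2
          by_cases hkm : k < mid
          · exact le_trans (hLmax k hk1 hkm) hcmp
          · exact hRmax k (by omega) hk2
        · intro k hk1 hk2
          exact hRstrict k hk1 hk2
      · rw [if_neg hcmp]
        push Not at hcmp
        refine ⟨hL1, by omega, ?_, ?_⟩
        · intro k hk1 hk2
          by_cases hkm : k < mid
          · exact hLmax k hk1 hkm
          · exact le_trans (hRmax k (by omega) hk2) hcmp.le
        · intro k hk1 hk2
          by_cases hkm : k < mid
          · exact hLstrict k hk1 hkm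
          · exact lt_of_le_of_lt (hRmax k (by omega) hk2) hcmp

theorem pvLastIdx_isBest (l2 : List Int) (h : l2 ≠ []) :
    pvIsBest l2 0 (l2.length : Int) ((pvLastIdx l2 : Nat) : Int) := by
  have hlt := pvLastIdx_lt l2 h
  have hget := pvLastIdx_get l2 h
  refine ⟨by positivity, by exact_mod_cast hlt, ?_, ?_⟩
  · intro j hj1 hj2
    rw [PySem.List.pyGetD_of_nonneg l2 0 hj1, PySem.List.pyGetD_of_nonneg l2 0 (by positivity)]
    have hjn : j.toNat < l2.length := by omega
    rw [Int.toNat_natCast, hget]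
    apply pvMax_isMax
    rw [List.getD_eq_getElem l2 0 hjn]
    exact List.getElem_mem hjn
  · intro j hj1 hj2
    rw [PySem.List.pyGetD_of_nonneg l2 0 (by omega), PySem.List.pyGetD_of_nonneg l2 0 (by positivity)]
    have hjn : j.toNat < l2.length := by omega
    rw [Int.toNat_natCast, hget]
    have hne := pvLastIdx_last l2 h j.toNat hjn (by omega)
    have hle : l2.getD j.toNat 0 ≤ pvMax l2 := by
      apply pvMax_isMax
      rw [List.getD_eq_getElem l2 0 hjn]
      exact List.getElem_mem hjn
    omega

theorem pvBest_eq_pvLastIdx (l2 : List Int) (h : l2 ≠ []) :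
    pvBest l2 0 (l2.length : Int) = ((pvLastIdx l2 : Nat) : Int) := by
  have h0 : (0 : Int) < (l2.length : Int) := by
    exact_mod_cast List.length_pos_iff.2 h
  exact pvIsBest_unique l2 0 (l2.length : Int) _ _
    (pvBest_isBest l2 ((l2.length : Int) - 0).toNat 0 (l2.length : Int) rfl h0)
    (pvLastIdx_isBest l2 h)

theorem altB (l1 l2 : List Int) (h : l2 ≠ []) (hlt : pvLastIdx l2 < l1.length) :
    EncontrarModa_alt l1 l2 = l1.getD (pvLastIdx l2) 0 := by
  unfold EncontrarModa_alt
  rw [pvBest_eq_pvLastIdx l2 h, PySem.List.pyGet?_natCast]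
  rw [List.getElem?_eq_getElem hlt]
  rw [List.getD_eq_getElem l1 0 hlt]

theorem aA (l1 l2 : List Int) (h : l2 ≠ []) (hlt : pvLastIdx l2 < l1.length) :
    EncontrarModa l1 l2 = l1.getD (pvLastIdx l2) 0 := by
  obtain ⟨a, t, rfl⟩ : ∃ a t, l2 = a :: t := by
    cases l2 with
    | nil => simp at h
    | cons a t => exact ⟨a, t, rfl⟩
  unfold EncontrarModa
  rw [PySem.List.pyGet?_zero_cons]
  have hd : (a :: t).headD 0 = a := rfl
  have := loopA (a :: t) h
  rw [hd] at this
  simp only [this]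
  rw [PySem.List.pyGet?_natCast]
  rw [List.getElem?_eq_getElem hlt]
  rw [List.getD_eq_getElem l1 0 hlt]

theorem pre_lt (l1 l2 : List Int) (hp : Pre_EncontrarModa l1 l2) : pvLastIdx l2 < l1.length := by
  obtain ⟨h2, i, hi2, hi1, hmax, hstrict⟩ := hp
  have hL := pvLastIdx_lt l2 h2
  have hGet := pvLastIdx_get l2 h2
  have hle : l2.getD i 0 ≤ pvMax l2 := by
    apply pvMax_isMax
    rw [List.getD_eq_getElem l2 0 hi2]
    exact List.getElem_mem hi2
  have hge : pvMax l2 ≤ l2.getD i 0 := by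
    have := hmax (pvLastIdx l2) hL
    rwa [hGet] at this
  have hEq : l2.getD i 0 = pvMax l2 := le_antisymm hle hge
  rcases lt_trichotomy i (pvLastIdx l2) with hlt | heq | hgt
  · have := hstrict (pvLastIdx l2) hL hlt
    rw [hGet, hEq] at this
    exact absurd this (lt_irrefl _)
  · rwa [← heq]
  · have := pvLastIdx_last l2 h2 i hi2 hgt
    exact absurd hEq this

-- ===== VERDICT (by name: the statement is the Claim_ definition above) =====
theorem EncontrarModa_spec : Claim_equal_EncontrarModa := by
  intro l1 l2 _hd hp
  have h2 : l2 ≠ [] := hp.1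
  have hlt := pre_lt l1 l2 hp
  unfold Spec_EncontrarModa
  rw [aA l1 l2 h2 hlt, altB l1 l2 h2 hlt]
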